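-- pv_equiv track=rewrite | github.com/Integration-IT/Active-Directory-Exploitation-Cheat-Sheet | Z - Tool Box/Mssqli-RID-Bruteforcing/python/mssqli-duet.py | unicode_encode_unescaped
-- ===== SOURCE A (Python) =====
-- import string
--
-- def unicode_encode_unescaped(payload):
--     retVal = payload
--     if payload:
--         retVal = ""
--         i = 0
--
--         while i < len(payload):
--             if payload[i] == '%' and (i < len(payload) - 2) and payload[i + 1:i + 2] in string.hexdigits and payload[i + 2:i + 3] in string.hexdigits:
--                 retVal += "u00%s" % payload[i + 1:i + 3]
--                 i += 3
--             else:
--                 retVal += 'u%.4X' % ord(payload[i])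
--                 i += 1
--
--     return retVal
-- ===== SOURCE B (Python) =====
-- HEXDIGITS = frozenset('0123456789abcdefABCDEF')
--
-- def _encode_run(chunk):
--     return ''.join('u%.4X' % ord(c) for c in chunk)
--
-- def unicode_encode_unescaped(payload):
--     if not payload:
--         return payload
--     pieces = payload.split('%')
--     parts = [_encode_run(pieces[0])]
--     for p in pieces[1:]:
--         if len(p) >= 2 and p[0] in HEXDIGITS and p[1] in HEXDIGITS:
--             parts.append('u00' + p[:2] + _encode_run(p[2:]))
--         else:
--             parts.append('u0025' + _encode_run(p))
--     return ''.join(parts)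
-- ===== Notes on version B (the rewrite author's own statement) =====
-- stated objective: faster
-- what changed: Replaces the variable-stride index while-loop that grows the result with repeated string concatenation by a split-on-'%' decomposition: encode the head run, handle each '%'-piece by testing its two-hex prefix, and join the collected parts once.
import Mathlib
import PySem

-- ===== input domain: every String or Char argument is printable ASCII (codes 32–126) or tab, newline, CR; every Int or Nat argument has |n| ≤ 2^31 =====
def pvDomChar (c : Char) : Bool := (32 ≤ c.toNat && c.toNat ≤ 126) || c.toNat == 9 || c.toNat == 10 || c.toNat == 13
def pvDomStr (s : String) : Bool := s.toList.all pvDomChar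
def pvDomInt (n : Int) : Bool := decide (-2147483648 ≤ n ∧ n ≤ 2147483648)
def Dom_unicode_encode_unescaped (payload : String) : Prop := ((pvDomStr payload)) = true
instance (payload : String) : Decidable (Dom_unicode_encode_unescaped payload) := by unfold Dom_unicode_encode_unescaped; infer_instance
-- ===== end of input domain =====

-- Port of A (index while-loop, repeated string concatenation) vs B (split-on-'%' decomposition with one final join): A and B agree on every string; a timing run measured B faster on large inputs.
-- ===== PORT A =====
-- hexdigit test: c in string.hexdigits (single char); exact for single characters
def pvHexDigit (c : Char) : Bool := "0123456789abcdefABCDEF".toList.contains c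

-- 'u%.4X' % ord(c): 'u' plus 4 uppercase hex digits; exact for code points < 0x10000 (all of Dom)
def pvHexNib (n : Nat) : Char := "0123456789ABCDEF".toList.getD (n % 16) '0'
def pvHex4 (n : Nat) : String :=
  String.ofList ['u', pvHexNib (n / 4096), pvHexNib (n / 256), pvHexNib (n / 16), pvHexNib n]

-- the while-loop of A over index i; getD defaults are unreachable under the guards
def pvALoop (cs : List Char) (i : Nat) : String :=
  if i < cs.length then
    if cs.getD i ' ' = '%' && decide ((i : Int) < (cs.length : Int) - 2)
        && pvHexDigit (cs.getD (i+1) ' ') && pvHexDigit (cs.getD (i+2) ' ') then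
      ("u00" ++ String.ofList [cs.getD (i+1) ' ', cs.getD (i+2) ' ']) ++ pvALoop cs (i+3)
    else
      pvHex4 (cs.getD i ' ').toNat ++ pvALoop cs (i+1)
  else ""
termination_by cs.length - i

def unicode_encode_unescaped (payload : String) : String :=
  if payload == "" then payload else pvALoop payload.toList 0

-- ===== PORT B =====
-- hand port of payload.split('%') (single-character separator, empty pieces kept); exact
def pvSplitPct : List Char → List (List Char)
  | [] => [[]]
  | c :: t =>
    if c = '%' then [] :: pvSplitPct t
    else match pvSplitPct t with
      | h :: tl => (c :: h) :: tl
      | [] => [[c]]   -- unreachable: pvSplitPct never returns []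

-- _encode_run
def pvEncodeRun (p : List Char) : String := String.join (p.map (fun c => pvHex4 c.toNat))

-- body of B's for-loop over pieces[1:]
def pvBPiece (p : List Char) : String :=
  match p with
  | a :: b :: rest =>
    if pvHexDigit a && pvHexDigit b then ("u00" ++ String.ofList [a, b]) ++ pvEncodeRun rest
    else "u0025" ++ pvEncodeRun p
  | _ => "u0025" ++ pvEncodeRun p

def unicode_encode_unescaped_alt (payload : String) : String :=
  if payload == "" then payload
  else
    match pvSplitPct payload.toList with
    | [] => ""   -- unreachable: pvSplitPct never returns []
    | p0 :: rest => String.join (pvEncodeRun p0 :: rest.map pvBPiece)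

-- ===== PRECONDITION & SPEC =====
def Spec_unicode_encode_unescaped (payload : String) (out : String) : Prop := out = unicode_encode_unescaped_alt payload
instance (payload : String) (out : String) : Decidable (Spec_unicode_encode_unescaped payload out) := by unfold Spec_unicode_encode_unescaped; infer_instance

-- ===== CLAIM (what is proved, stated in full; the proofs are below) =====
def Claim_equal_unicode_encode_unescaped : Prop := ∀ (payload : String), Dom_unicode_encode_unescaped payload → Spec_unicode_encode_unescaped payload (unicode_encode_unescaped payload)

-- ===== LEMMAS AND PROOFS =====

-- B's whole body on a char list (head piece encoded as a run, later pieces via pvBPiece)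
def pvBList (cs : List Char) : String :=
  match pvSplitPct cs with
  | [] => ""
  | p0 :: rest => String.join (pvEncodeRun p0 :: rest.map pvBPiece)

theorem pvSplitPct_ne_nil (cs : List Char) : pvSplitPct cs ≠ [] := by
  cases cs with
  | nil => simp [pvSplitPct]
  | cons c t =>
    simp only [pvSplitPct]
    split
    · simp
    · split <;> simp

-- A's loop as structural recursion on the remaining suffix
def pvAList : List Char → String
  | [] => ""
  | [c] => pvHex4 c.toNat ++ pvAList []
  | [c, d] => pvHex4 c.toNat ++ pvAList [d]
  | c :: a :: b :: r =>
    if c = '%' && pvHexDigit a && pvHexDigit b then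
      ("u00" ++ String.ofList [a, b]) ++ pvAList r
    else pvHex4 c.toNat ++ pvAList (a :: b :: r)

theorem pvJoin_foldl (l : List String) (x : String) :
    List.foldl (fun r s => r ++ s) x l = x ++ List.foldl (fun r s => r ++ s) "" l := by
  induction l generalizing x with
  | nil => simp
  | cons a l ih => simp only [List.foldl]; rw [ih (x ++ a), ih ("" ++ a)]; simp [String.append_assoc]

theorem pvJoin_cons (s : String) (l : List String) :
    String.join (s :: l) = s ++ String.join l := by
  simp [String.join, List.foldl]; rw [pvJoin_foldl]

theorem pvEncodeRun_cons (c : Char) (p : List Char) :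
    pvEncodeRun (c :: p) = pvHex4 c.toNat ++ pvEncodeRun p := by
  simp [pvEncodeRun, pvJoin_cons]

theorem pvHex_ne_pct {a : Char} (h : pvHexDigit a = true) : a ≠ '%' := by
  intro he; rw [he] at h; exact absurd h (by decide)

theorem pvSplitPct_pct (t : List Char) : pvSplitPct ('%' :: t) = [] :: pvSplitPct t := by
  simp [pvSplitPct]

theorem pvSplitPct_non {c : Char} (t : List Char) (hc : c ≠ '%') {h : List Char}
    {tl : List (List Char)} (ht : pvSplitPct t = h :: tl) :
    pvSplitPct (c :: t) = (c :: h) :: tl := by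
  simp [pvSplitPct, hc, ht]

-- pvAList for a cons whose tail is short (< 2 chars) or fails the hex test: encode one char
theorem pvAList_cons_plain (c : Char) (t : List Char)
    (h : match t with
      | a :: b :: _ => (c = '%' && pvHexDigit a && pvHexDigit b) = false
      | _ => True) :
    pvAList (c :: t) = pvHex4 c.toNat ++ pvAList t := by
  match t with
  | [] => rfl
  | [d] => rfl
  | a :: b :: r => simp only [pvAList, h, Bool.false_eq_true, if_false]

theorem pvALoop_eq_pvAList (cs : List Char) (i : Nat) :
    pvALoop cs i = pvAList (cs.drop i) := by
  fun_induction pvALoop cs i with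
  | case1 i hlt hcond ih =>
    have h2 : i + 2 < cs.length := by
      simp only [Bool.and_eq_true, decide_eq_true_eq] at hcond
      omega
    have h1 : i + 1 < cs.length := by omega
    rw [List.drop_eq_getElem_cons hlt, List.drop_eq_getElem_cons h1,
        List.drop_eq_getElem_cons h2]
    simp only [Bool.and_eq_true, decide_eq_true_eq, List.getD_eq_getElem?_getD,
      List.getElem?_eq_getElem, hlt, h1, h2, Option.getD_some] at hcond
    obtain ⟨⟨⟨hpc, _⟩, ha⟩, hb⟩ := hcond
    simp only [pvAList, hpc, ha, hb, decide_true, Bool.and_self, if_pos]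
    rw [ih]
    simp [List.getD_eq_getElem?_getD, h1, h2]
  | case2 i hlt hcond ih =>
    rw [List.drop_eq_getElem_cons hlt]
    have hgd : cs.getD i ' ' = cs[i] := by
      simp [List.getD_eq_getElem?_getD, hlt]
    rw [pvAList_cons_plain, ih, hgd]
    rcases hdl : cs.drop (i + 1) with _ | ⟨a, _ | ⟨b, r⟩⟩
    · trivial
    · trivial
    · have hlen : (cs.drop (i + 1)).length = cs.length - (i + 1) := List.length_drop ..
      rw [hdl] at hlen
      simp only [List.length_cons] at hlen
      have h2 : i + 2 < cs.length := by omega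
      have h1 : i + 1 < cs.length := by omega
      have ha : a = cs[i + 1] := by
        have := List.drop_eq_getElem_cons (l := cs) h1
        rw [hdl, List.drop_eq_getElem_cons h2] at this
        exact (List.cons.injEq ..).mp this |>.1
      have hb : b = cs[i + 2] := by
        have := List.drop_eq_getElem_cons (l := cs) h1
        rw [hdl, List.drop_eq_getElem_cons h2] at this
        exact ((List.cons.injEq ..).mp ((List.cons.injEq ..).mp this).2).1
      by_contra hne
      apply hcond
      simp only [Bool.and_eq_true, decide_eq_true_eq, Bool.not_eq_false] at hne ⊢
      refine ⟨⟨⟨by rw [hgd]; exact hne.1.1, by omega⟩, ?_⟩, ?_⟩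
      · simpa [List.getD_eq_getElem?_getD, h1, ← ha] using hne.1.2
      · simpa [List.getD_eq_getElem?_getD, h2, ← hb] using hne.2
  | case3 i hlt =>
    rw [List.drop_of_length_le (by omega)]
    rfl

theorem pvBList_eq (t : List Char) {p0 : List Char} {rest : List (List Char)}
    (h : pvSplitPct t = p0 :: rest) :
    pvBList t = pvEncodeRun p0 ++ String.join (rest.map pvBPiece) := by
  simp [pvBList, h, pvJoin_cons]

theorem pvBList_pct (t : List Char) {p0 : List Char} {rest : List (List Char)}
    (h : pvSplitPct t = p0 :: rest) :
    pvBList ('%' :: t) = pvBPiece p0 ++ String.join (rest.map pvBPiece) := by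
  simp [pvBList, pvSplitPct_pct, h, pvEncodeRun, String.join]
  exact pvJoin_foldl _ _

theorem pvBList_non {c : Char} (t : List Char) (hc : c ≠ '%') :
    pvBList (c :: t) = pvHex4 c.toNat ++ pvBList t := by
  rcases hsp : pvSplitPct t with _ | ⟨h, tl⟩
  · exact absurd hsp (pvSplitPct_ne_nil t)
  · rw [pvBList_eq t hsp, pvBList_eq (c :: t) (pvSplitPct_non t hc hsp),
      pvEncodeRun_cons, String.append_assoc]

theorem pvBList_pct_plain (t : List Char) {p0 : List Char} {rest : List (List Char)}
    (hsp : pvSplitPct t = p0 :: rest) (hp : pvBPiece p0 = "u0025" ++ pvEncodeRun p0) :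
    pvBList ('%' :: t) = "u0025" ++ pvBList t := by
  rw [pvBList_pct t hsp, hp, String.append_assoc, ← pvBList_eq t hsp]

-- if t does not start with two hexdigits, the head piece of split(t) fails B's prefix test
theorem pvHead_plain (t : List Char)
    (h : match t with
      | a :: b :: _ => (pvHexDigit a && pvHexDigit b) = false
      | _ => True)
    {p0 : List Char} {rest : List (List Char)} (hsp : pvSplitPct t = p0 :: rest) :
    pvBPiece p0 = "u0025" ++ pvEncodeRun p0 := by
  match t with
  | [] =>
    simp only [pvSplitPct] at hsp
    obtain ⟨rfl, -⟩ := (List.cons.injEq ..).mp hsp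
    rfl
  | [a] =>
    by_cases ha : a = '%'
    · subst ha
      rw [pvSplitPct_pct] at hsp
      obtain ⟨rfl, -⟩ := (List.cons.injEq ..).mp hsp
      rfl
    · rw [pvSplitPct_non [] ha rfl] at hsp
      obtain ⟨rfl, -⟩ := (List.cons.injEq ..).mp hsp
      rfl
  | a :: b :: r =>
    by_cases ha : a = '%'
    · subst ha
      rw [pvSplitPct_pct] at hsp
      obtain ⟨rfl, -⟩ := (List.cons.injEq ..).mp hsp
      rfl
    · by_cases hhexa : pvHexDigit a
      · have hb : (pvHexDigit b) = false := by
          by_contra hbb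
          rw [Bool.not_eq_false] at hbb
          simp [hhexa, hbb] at h
        by_cases hbp : b = '%'
        · subst hbp
          rw [pvSplitPct_non (('%') :: r) ha (pvSplitPct_pct r)] at hsp
          obtain ⟨rfl, -⟩ := (List.cons.injEq ..).mp hsp
          rfl
        · rcases hsr : pvSplitPct r with _ | ⟨hh, tl⟩
          · exact absurd hsr (pvSplitPct_ne_nil r)
          · rw [pvSplitPct_non (b :: r) ha (pvSplitPct_non r hbp hsr)] at hsp
            obtain ⟨rfl, -⟩ := (List.cons.injEq ..).mp hsp
            simp only [pvBPiece, hb, Bool.and_false, Bool.false_eq_true, if_false]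
      · simp only [Bool.not_eq_true] at hhexa
        rcases hst : pvSplitPct (b :: r) with _ | ⟨hh, tl⟩
        · exact absurd hst (pvSplitPct_ne_nil _)
        · rw [pvSplitPct_non (b :: r) ha hst] at hsp
          obtain ⟨rfl, -⟩ := (List.cons.injEq ..).mp hsp
          match hh with
          | [] => rfl
          | x :: y => simp only [pvBPiece, hhexa, Bool.false_and, Bool.false_eq_true, if_false]

theorem pvHexPct : pvHex4 '%'.toNat = "u0025" := by decide

theorem pvAList_eq_pvBList (cs : List Char) : pvAList cs = pvBList cs := by
  fun_induction pvAList cs with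
  | case1 => rfl
  | case2 c ih =>
    by_cases hc : c = '%'
    · subst hc
      rcases hsp : pvSplitPct ([] : List Char) with _ | ⟨p0, rest⟩
      · exact absurd hsp (pvSplitPct_ne_nil _)
      · rw [pvBList_pct_plain [] hsp (pvHead_plain [] trivial hsp), ih, pvHexPct]
    · rw [pvBList_non [] hc, ih]
  | case3 c d ih =>
    by_cases hc : c = '%'
    · subst hc
      rcases hsp : pvSplitPct [d] with _ | ⟨p0, rest⟩
      · exact absurd hsp (pvSplitPct_ne_nil _)
      · rw [pvBList_pct_plain [d] hsp (pvHead_plain [d] trivial hsp), ih, pvHexPct]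
    · rw [pvBList_non [d] hc, ih]
  | case4 c a b r hcond ih =>
    simp only [Bool.and_eq_true, decide_eq_true_eq] at hcond
    obtain ⟨⟨rfl, ha⟩, hb⟩ := hcond
    have hna : a ≠ '%' := pvHex_ne_pct ha
    have hnb : b ≠ '%' := pvHex_ne_pct hb
    rcases hsr : pvSplitPct r with _ | ⟨hh, tl⟩
    · exact absurd hsr (pvSplitPct_ne_nil r)
    · rw [pvBList_pct (a :: b :: r)
        (pvSplitPct_non (b :: r) hna (pvSplitPct_non r hnb hsr))]
      simp only [pvBPiece, ha, hb, Bool.and_self, if_true]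
      rw [ih, pvBList_eq r hsr]
      simp [String.append_assoc]
  | case5 c a b r hcond ih =>
    by_cases hc : c = '%'
    · subst hc
      have hnab : (pvHexDigit a && pvHexDigit b) = false := by
        by_contra hbb
        rw [Bool.not_eq_false] at hbb
        exact absurd (by simp [hbb]) hcond
      rcases hsp : pvSplitPct (a :: b :: r) with _ | ⟨p0, rest⟩
      · exact absurd hsp (pvSplitPct_ne_nil _)
      · rw [pvBList_pct_plain (a :: b :: r) hsp (pvHead_plain (a :: b :: r) hnab hsp), ih, pvHexPct]
    · rw [pvBList_non (a :: b :: r) hc, ih]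

-- ===== VERDICT (by name: the statement is the Claim_ definition above) =====
theorem unicode_encode_unescaped_spec : Claim_equal_unicode_encode_unescaped := by
  intro payload _
  show unicode_encode_unescaped payload = unicode_encode_unescaped_alt payload
  unfold unicode_encode_unescaped unicode_encode_unescaped_alt
  split
  · rfl
  · rw [pvALoop_eq_pvAList, List.drop_zero, pvAList_eq_pvBList, pvBList]
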